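-- pv_equiv track=rewrite | github.com/xizsmin/TIL | Algorithm/201025/1609. Even Odd Tree.py | strictlyOddIncreasing
-- ===== SOURCE A (Python) =====
-- def strictlyOddIncreasing(l: list) -> bool:
--     if l[0] % 2 == 0:
--         return False
--     for i in range(1, len(l)):
--         if l[i] % 2 == 0:
--             return False
--
--         if l[i] <= l[i-1]:
--             return False
--     return True
-- ===== SOURCE B (Python) =====
-- def strictlyOddIncreasing(l: list) -> bool:
--     if l[0] % 2 == 0:
--         return False
--     return all(x % 2 == 1 for x in l) and l == sorted(l) and len(set(l)) == len(l)
-- ===== Notes on version B (the rewrite author's own statement) =====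
-- stated objective: alternative
-- what changed: Replaces the index loop with adjacent-pair comparisons by a whole-list formulation: all-odd via all(), strict increase via comparing l with sorted(l) plus a set-based distinctness check.
import Mathlib
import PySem

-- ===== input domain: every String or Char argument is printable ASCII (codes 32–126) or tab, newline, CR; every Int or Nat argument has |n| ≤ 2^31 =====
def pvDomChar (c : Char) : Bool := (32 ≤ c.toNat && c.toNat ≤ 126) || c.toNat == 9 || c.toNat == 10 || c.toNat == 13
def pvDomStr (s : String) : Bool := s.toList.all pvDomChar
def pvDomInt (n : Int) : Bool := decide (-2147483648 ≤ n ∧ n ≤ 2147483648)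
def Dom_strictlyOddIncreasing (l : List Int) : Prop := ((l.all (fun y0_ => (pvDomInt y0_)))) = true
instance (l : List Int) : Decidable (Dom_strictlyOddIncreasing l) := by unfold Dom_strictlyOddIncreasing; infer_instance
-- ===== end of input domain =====

-- B replaces A's index loop over adjacent pairs by a whole-list check: all-odd, l = sorted(l), and
-- set-based distinctness (alternative decomposition, not claimed faster).

-- ===== PORT A =====
-- the for-loop of A: i runs over range(1, len(l)); indices i and i-1 are always in range,
-- so Python's l[i] / l[i-1] are List.getD here
def pvALoop (l : List Int) (i : Nat) : Bool :=
  if _h : i < l.length then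
    if PySem.Int.mod (l.getD i 0) 2 = 0 then false
    else if l.getD i 0 ≤ l.getD (i - 1) 0 then false
    else pvALoop l (i + 1)
  else true
termination_by l.length - i

def strictlyOddIncreasing (l : List Int) : Bool :=
  match PySem.List.pyGet? l 0 with
  | none => false   -- Python raises IndexError here (empty l); excluded by Pre_
  | some x0 => if PySem.Int.mod x0 2 = 0 then false else pvALoop l 1

-- ===== PORT B =====
def strictlyOddIncreasing_alt (l : List Int) : Bool :=
  match PySem.List.pyGet? l 0 with
  | none => false   -- Python raises IndexError here (empty l); excluded by Pre_
  | some x0 =>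
    if PySem.Int.mod x0 2 = 0 then false
    else (l.all fun x => PySem.Int.mod x 2 = 1)
         && decide (l = PySem.List.sorted l (fun x => x) false)
         && decide ((PySem.Set.ofList l).length = l.length)

-- ===== PRECONDITION & SPEC =====
-- Pre_ excludes only the empty list, on which both Pythons raise IndexError when reading the first element
def Pre_strictlyOddIncreasing (l : List Int) : Prop := l ≠ []
instance (l : List Int) : Decidable (Pre_strictlyOddIncreasing l) := by unfold Pre_strictlyOddIncreasing; infer_instance
def pvWitness_strictlyOddIncreasing : List Int := [1, 3, 5]

def Spec_strictlyOddIncreasing (l : List Int) (out : Bool) : Prop := out = strictlyOddIncreasing_alt l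
instance (l : List Int) (out : Bool) : Decidable (Spec_strictlyOddIncreasing l out) := by unfold Spec_strictlyOddIncreasing; infer_instance

-- ===== CLAIM (what is proved, stated in full; the proofs are below) =====
def Claim_equal_strictlyOddIncreasing : Prop := ∀ (l : List Int), Dom_strictlyOddIncreasing l → Pre_strictlyOddIncreasing l → Spec_strictlyOddIncreasing l (strictlyOddIncreasing l)

-- ===== LEMMAS AND PROOFS =====

-- characterisation of A's loop
lemma pvALoop_true_iff (l : List Int) (i : Nat) :
    pvALoop l i = true ↔
      ∀ j, i ≤ j → j < l.length →
        PySem.Int.mod (l.getD j 0) 2 ≠ 0 ∧ l.getD (j - 1) 0 < l.getD j 0 := by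
  induction i using pvALoop.induct (l := l) with
  | case1 i h hmod =>
    rw [pvALoop]
    simp only [dif_pos h, if_pos hmod]
    constructor
    · intro hf; exact absurd hf (by simp)
    · intro hall
      exact absurd hmod (hall i le_rfl h).1
  | case2 i h hmod hle =>
    rw [pvALoop]
    simp only [dif_pos h, if_neg hmod, if_pos hle]
    constructor
    · intro hf; exact absurd hf (by simp)
    · intro hall
      exact absurd (hall i le_rfl h).2 (not_lt.mpr hle)
  | case3 i h hmod hle ih =>
    rw [pvALoop]
    simp only [dif_pos h, if_neg hmod, if_neg hle]
    rw [ih]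
    constructor
    · intro hall j hij hj
      rcases Nat.eq_or_lt_of_le hij with rfl | hlt
      · exact ⟨hmod, lt_of_not_ge hle⟩
      · exact hall j hlt hj
    · intro hall j hij hj
      exact hall j (le_of_lt (Nat.lt_of_lt_of_le (Nat.lt_succ_self i) hij)) hj
  | case4 i h =>
    rw [pvALoop]
    simp only [dif_neg h]
    constructor
    · intro _ j hij hj
      exact absurd (Nat.lt_of_le_of_lt hij hj) h
    · intro _; trivial

lemma pv_mod_two_ne_zero_iff (x : Int) : PySem.Int.mod x 2 ≠ 0 ↔ PySem.Int.mod x 2 = 1 := by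
  have h0 := PySem.Int.mod_nonneg x (b := 2) (by omega)
  have h1 := PySem.Int.mod_lt x (b := 2) (by omega)
  omega

-- PySem.Set.ofList is a sublist of its argument
lemma pv_ofList_sublist (l : List Int) : (PySem.Set.ofList l).Sublist l := by
  induction l using List.reverseRecOn with
  | nil => simp [PySem.Set.ofList]
  | append_singleton xs x ih =>
    rw [PySem.Set.ofList_append_singleton, PySem.Set.add_eq_ite]
    split_ifs with hx
    · exact ih.trans (List.sublist_append_left xs [x])
    · exact ih.append_right [x]

lemma pv_ofList_length_iff (l : List Int) :
    (PySem.Set.ofList l).length = l.length ↔ l.Nodup := by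
  constructor
  · intro h
    have := (pv_ofList_sublist l).eq_of_length h
    rw [← this]; exact PySem.Set.nodup_ofList l
  · intro h
    rw [PySem.Set.ofList_eq_self_of_nodup _ h]

lemma pv_sorted_eq_iff (l : List Int) :
    l = PySem.List.sorted l (fun x => x) false ↔ l.Pairwise (· ≤ ·) := by
  constructor
  · intro h
    have := PySem.List.sorted_pairwise (xs := l) (key := fun x => x)
    rw [← h] at this
    exact this
  · intro h
    exact (PySem.List.sorted_eq_self_of_pairwise l (fun x => x) h).symm

lemma pv_pairwise_lt_iff (l : List Int) :
    l.Pairwise (· < ·) ↔ l.Pairwise (· ≤ ·) ∧ l.Nodup := by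
  constructor
  · intro h
    exact ⟨h.imp le_of_lt, h.imp ne_of_lt⟩
  · rintro ⟨hle, hnd⟩
    exact (hle.and hnd).imp (fun hab => lt_of_le_of_ne hab.1 hab.2)

-- adjacent strict increase at all positions 1..len-1 ↔ Pairwise (<)
lemma pv_adj_iff_pairwise (l : List Int) :
    (∀ j, 1 ≤ j → j < l.length → l.getD (j - 1) 0 < l.getD j 0) ↔ l.Pairwise (· < ·) := by
  rw [← List.isChain_iff_pairwise, List.isChain_iff_getElem]
  constructor
  · intro h i hi
    have hx := h (i + 1) (by omega) hi
    simp only [Nat.add_sub_cancel] at hx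
    rwa [List.getD_eq_getElem l 0 (by omega), List.getD_eq_getElem l 0 hi] at hx
  · intro h j h1 h2
    have hx := h (j - 1) (by omega)
    simp only [Nat.sub_add_cancel h1] at hx
    rwa [List.getD_eq_getElem l 0 (by omega), List.getD_eq_getElem l 0 h2]

lemma pv_all_iff (l : List Int) :
    (l.all fun x => PySem.Int.mod x 2 = 1) = true ↔
      ∀ j, j < l.length → PySem.Int.mod (l.getD j 0) 2 ≠ 0 := by
  rw [List.all_eq_true]
  constructor
  · intro h j hj
    rw [List.getD_eq_getElem l 0 hj, pv_mod_two_ne_zero_iff]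
    have := h l[j] (l.getElem_mem hj)
    simpa using this
  · intro h x hx
    obtain ⟨j, hj, rfl⟩ := List.mem_iff_getElem.mp hx
    have := h j hj
    rw [List.getD_eq_getElem l 0 hj, pv_mod_two_ne_zero_iff] at this
    simpa using this

-- ===== VERDICT (by name: the statement is the Claim_ definition above) =====
theorem strictlyOddIncreasing_spec : Claim_equal_strictlyOddIncreasing := by
  intro l _ hpre
  unfold Spec_strictlyOddIncreasing strictlyOddIncreasing strictlyOddIncreasing_alt
  cases l with
  | nil => exact absurd rfl hpre
  | cons h t =>
    have hget : PySem.List.pyGet? (h :: t) (0 : Int) = some h := by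
      simp [PySem.List.pyGet?, PySem.List.pyIdx?]
    rw [hget]
    by_cases hmod : PySem.Int.mod h 2 = 0
    · simp only [if_pos hmod]
    · simp only [if_neg hmod]
      set l := h :: t with hl
      rw [Bool.eq_iff_iff, pvALoop_true_iff]
      simp only [Bool.and_eq_true, decide_eq_true_eq, pv_all_iff,
        pv_sorted_eq_iff, pv_ofList_length_iff]
      constructor
      · intro hA
        have hadj : ∀ j, 1 ≤ j → j < l.length → l.getD (j - 1) 0 < l.getD j 0 :=
          fun j h1 h2 => (hA j h1 h2).2
        have hlt := (pv_adj_iff_pairwise l).mp hadj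
        refine ⟨⟨?_, ((pv_pairwise_lt_iff l).mp hlt).1⟩, ((pv_pairwise_lt_iff l).mp hlt).2⟩
        intro j hj
        cases j with
        | zero =>
          simpa [hl] using hmod
        | succ j' => exact (hA (j' + 1) (by omega) hj).1
      · rintro ⟨⟨hodd, hle⟩, hnd⟩
        have hlt := (pv_pairwise_lt_iff l).mpr ⟨hle, hnd⟩
        have hadj := (pv_adj_iff_pairwise l).mpr hlt
        intro j h1 h2
        exact ⟨hodd j h2, hadj j h1 h2⟩
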